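-- pv_equiv track=rewrite | github.com/levhyun/PythonDatabaseWorkbench | Server/Service.py | CommandDecomposition3
-- ===== SOURCE A (Python) =====
-- def CommandDecomposition3(command):
--     optionList = []
--     temp = ""
--     for i in command:
--         if i != '[' and i != ']':
--             temp += i
--         if i == ']':
--             optionList.append(temp)
--             temp = ""
--     return optionList[0], optionList[1], optionList[2]
-- ===== SOURCE B (Python) =====
-- def CommandDecomposition3(command):
--     segments = command.replace('[', '').split(']')[:-1]
--     return segments[0], segments[1], segments[2]
-- ===== Notes on version B (the rewrite author's own statement) =====
-- stated objective: idiomatic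
-- what changed: Replaces the per-character loop with explicit temp accumulator and branching by two bulk string operations: strip all '[' with str.replace, segment with str.split(']'), drop the trailing remainder with [:-1], and return the first three segments.
import Mathlib
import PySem

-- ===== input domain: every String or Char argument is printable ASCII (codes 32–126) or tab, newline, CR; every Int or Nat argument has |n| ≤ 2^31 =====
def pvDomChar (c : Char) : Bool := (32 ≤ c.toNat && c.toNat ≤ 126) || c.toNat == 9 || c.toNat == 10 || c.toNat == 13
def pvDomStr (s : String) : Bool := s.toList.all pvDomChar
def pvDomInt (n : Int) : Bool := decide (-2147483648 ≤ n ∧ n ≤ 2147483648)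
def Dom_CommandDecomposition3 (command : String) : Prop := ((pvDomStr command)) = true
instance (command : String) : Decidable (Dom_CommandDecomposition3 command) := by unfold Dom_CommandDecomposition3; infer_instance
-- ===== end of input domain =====

-- B replaces A's per-character accumulator loop by bulk string operations (replace + split + slice); objective: idiomatic.

-- ===== PORT A =====
-- A's loop body: temp collects non-bracket chars, a ']' flushes temp into the list.
def aStep (st : List String × String) (i : Char) : List String × String :=
  let temp := if i ≠ '[' ∧ i ≠ ']' then st.2.push i else st.2
  if i = ']' then (st.1 ++ [temp], "") else (st.1, temp)

-- optionList[k] raises IndexError when fewer than three ']' occur; Pre_ excludes those inputs,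
-- so the `getD ""` defaults below are never reached on the claimed domain.
def CommandDecomposition3 (command : String) : String × String × String :=
  let st := command.toList.foldl aStep ([], "")
  (((PySem.List.pyGet? st.1 0).getD ""), ((PySem.List.pyGet? st.1 1).getD ""),
   ((PySem.List.pyGet? st.1 2).getD ""))

-- ===== PORT B =====
-- Source B: segments = command.replace('[', '').split(']')[:-1]; return segments[0..2].
-- split? never returns none here (the separator "]" is non-empty), so the getD [] default is never reached;
-- segments[k] raises IndexError exactly where A raises, outside Pre_.
def CommandDecomposition3_alt (command : String) : String × String × String :=
  let stripped := PySem.Str.replace command "[" ""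
  let segments := PySem.List.slice ((PySem.Str.split? stripped "]").getD []) none (some (-1))
  (((PySem.List.pyGet? segments 0).getD ""), ((PySem.List.pyGet? segments 1).getD ""),
   ((PySem.List.pyGet? segments 2).getD ""))

-- ===== PRECONDITION & SPEC =====
-- Pre_ excludes exactly the inputs with fewer than three ']', on which A raises IndexError.
def Pre_CommandDecomposition3 (command : String) : Prop := 3 ≤ command.toList.count ']'
instance (command : String) : Decidable (Pre_CommandDecomposition3 command) := by
  unfold Pre_CommandDecomposition3; infer_instance

def pvWitness_CommandDecomposition3 : String := "[a][b][c]"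

def Spec_CommandDecomposition3 (command : String) (out : String × String × String) : Prop :=
  out = CommandDecomposition3_alt command
instance (command : String) (out : String × String × String) :
    Decidable (Spec_CommandDecomposition3 command out) := by
  unfold Spec_CommandDecomposition3; infer_instance

-- ===== CLAIM (what is proved, stated in full; the proofs are below) =====
def Claim_equal_CommandDecomposition3 : Prop := ∀ (command : String),
  Dom_CommandDecomposition3 command → Pre_CommandDecomposition3 command →
  Spec_CommandDecomposition3 command (CommandDecomposition3 command)

-- ===== LEMMAS AND PROOFS =====

-- simple one-pass split on ']' used as the common reference shape
def segSplit : List Char → List (List Char)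
  | [] => [[]]
  | c :: t => if c = ']' then [] :: segSplit t else (segSplit t).modifyHead (c :: ·)

theorem segSplit_ne_nil (l : List Char) : segSplit l ≠ [] := by
  cases l with
  | nil => simp [segSplit]
  | cons c t =>
    simp only [segSplit]
    split
    · simp
    · cases h : segSplit t with
      | nil => exact absurd h (segSplit_ne_nil t)
      | cons a s => simp [List.modifyHead]

-- A-side: the flushed segments and the leftover accumulator of A's loop
def segsOut (temp : List Char) : List Char → List (List Char)
  | [] => []
  | c :: t =>
    if c = ']' then temp :: segsOut [] t
    else if c = '[' then segsOut temp t
    else segsOut (temp ++ [c]) t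

def segsFin (temp : List Char) : List Char → List Char
  | [] => temp
  | c :: t =>
    if c = ']' then segsFin [] t
    else if c = '[' then segsFin temp t
    else segsFin (temp ++ [c]) t

theorem foldl_aStep (l : List Char) (acc : List String) (temp : List Char) :
    l.foldl aStep (acc, String.ofList temp)
      = (acc ++ (segsOut temp l).map String.ofList, String.ofList (segsFin temp l)) := by
  induction l generalizing acc temp with
  | nil => simp [segsOut, segsFin]
  | cons c t ih =>
    have h0 : ("" : String) = String.ofList [] := rfl
    by_cases hc : c = ']'
    · subst hc
      simp only [List.foldl_cons, aStep, segsOut, segsFin]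
      simp only [ne_eq, not_true_eq_false, and_false, if_false, if_pos rfl, if_true,
        reduceCtorEq, reduceIte, decide_true, decide_false, Char.reduceEq]
      rw [h0, ih]
      simp
    · by_cases hb : c = '['
      · subst hb
        simp only [List.foldl_cons, aStep, segsOut, segsFin]
        simp only [ne_eq, Char.reduceEq, not_false_eq_true, not_true_eq_false, and_false,
          false_and, if_false, reduceIte]
        rw [ih]
      · have hpush : (String.ofList temp).push c = String.ofList (temp ++ [c]) := by
          simp [String.ofList, String.push]
        simp only [List.foldl_cons, aStep, segsOut, segsFin, ne_eq, hb, hc, not_false_eq_true,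
          and_self, if_true, if_neg hc, if_neg hb, reduceIte, hpush]
        rw [ih]

theorem segsOut_eq (l : List Char) (temp : List Char) :
    segsOut temp l = ((segSplit (l.filter (· ≠ '['))).modifyHead (temp ++ ·)).dropLast := by
  induction l generalizing temp with
  | nil => simp [segsOut, segSplit, List.modifyHead]
  | cons c t ih =>
    by_cases hc : c = ']'
    · subst hc
      have hf : ((']' :: t).filter (· ≠ '[')) = ']' :: t.filter (· ≠ '[') := by
        simp [List.filter_cons]
      rw [segsOut, if_pos rfl, hf, segSplit, if_pos rfl]
      have hne : (segSplit (t.filter (· ≠ '['))) ≠ [] := segSplit_ne_nil _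
      rw [List.modifyHead_cons]
      rw [List.dropLast_cons_of_ne_nil hne]
      rw [ih ([])]
      congr 1
      · simp
      · congr 1
        cases h : segSplit (t.filter (· ≠ '[')) with
        | nil => exact absurd h hne
        | cons a s => simp [List.modifyHead]
    · by_cases hb : c = '['
      · subst hb
        have hf : (('[' :: t).filter (· ≠ '[')) = t.filter (· ≠ '[') := by
          simp [List.filter_cons]
        rw [segsOut, if_neg (by decide : ¬('[' : Char) = ']'), if_pos rfl, hf, ih]
      · have hf : ((c :: t).filter (· ≠ '[')) = c :: t.filter (· ≠ '[') := by
          simp [List.filter_cons, hb]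
        rw [segsOut, if_neg hc, if_neg hb, hf, segSplit, if_neg hc, ih]
        rw [List.modifyHead_modifyHead]
        congr 2
        funext x
        simp

-- replace.go with old = "[" and new = "" is filter (· ≠ '[')
theorem replace_go_eq (fuel : Nat) (l : List Char) (acc : List Char) (h : l.length ≤ fuel) :
    PySem.Chars.replace.go ['['] [] fuel l acc = acc.reverse ++ l.filter (· ≠ '[') := by
  induction fuel generalizing l acc with
  | zero =>
    have : l = [] := List.length_eq_zero_iff.mp (Nat.le_zero.mp h)
    subst this
    simp [PySem.Chars.replace.go]
  | succ n ih =>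
    cases l with
    | nil => simp [PySem.Chars.replace.go]
    | cons c t =>
      by_cases hb : c = '['
      · subst hb
        have h' : t.length ≤ n := by simpa using Nat.lt_succ_iff.mp (by simpa using h)
        simp [PySem.Chars.replace.go, List.isPrefixOf, ih t acc h', List.filter_cons]
      · simp only [PySem.Chars.replace.go]
        rw [if_neg (by simp [List.isPrefixOf, Ne.symm hb])]
        rw [ih t (c :: acc) (by simpa using Nat.lt_succ_iff.mp (by simpa using h))]
        simp [List.filter_cons, hb]

theorem chars_replace_eq (l : List Char) :
    PySem.Chars.replace l ['['] [] = l.filter (· ≠ '[') := by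
  rw [PySem.Chars.replace]
  rw [if_neg (by simp)]
  simpa using replace_go_eq l.length l [] le_rfl

-- splitOn.go with sep = "]" is segSplit (up to the running accumulators)
theorem splitOn_go_eq (fuel : Nat) (l : List Char) (cur : List Char) (acc : List (List Char))
    (h : l.length ≤ fuel) :
    PySem.Chars.splitOn.go [']'] fuel l cur acc
      = acc.reverse ++ (segSplit l).modifyHead (cur.reverse ++ ·) := by
  induction fuel generalizing l cur acc with
  | zero =>
    have : l = [] := List.length_eq_zero_iff.mp (Nat.le_zero.mp h)
    subst this
    simp [PySem.Chars.splitOn.go, segSplit, List.modifyHead]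
  | succ n ih =>
    cases l with
    | nil => simp [PySem.Chars.splitOn.go, segSplit, List.modifyHead]
    | cons c t =>
      by_cases hc : c = ']'
      · subst hc
        simp only [PySem.Chars.splitOn.go]
        rw [if_pos (by simp [List.isPrefixOf])]
        simp only [List.length_singleton, List.drop_succ_cons, List.drop_zero]
        rw [ih t [] (cur.reverse :: acc) (by simpa using Nat.lt_succ_iff.mp (by simpa using h))]
        rw [segSplit, if_pos rfl, List.modifyHead_cons]
        simp only [List.reverse_cons, List.reverse_nil, List.append_assoc, List.nil_append,
          List.append_nil]
        congr 1
        cases hs : segSplit t with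
        | nil => exact absurd hs (segSplit_ne_nil t)
        | cons a s => simp [List.modifyHead]
      · simp only [PySem.Chars.splitOn.go]
        rw [if_neg (by simp [List.isPrefixOf, Ne.symm hc])]
        rw [ih t (c :: cur) acc (by simpa using Nat.lt_succ_iff.mp (by simpa using h))]
        rw [segSplit, if_neg hc, List.modifyHead_modifyHead]
        congr 2
        funext x
        simp

theorem chars_splitOn_eq (l : List Char) :
    PySem.Chars.splitOn l [']'] = segSplit l := by
  rw [PySem.Chars.splitOn]
  rw [splitOn_go_eq (l.length + 1) l [] [] (Nat.le_succ _)]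
  cases hs : segSplit l with
  | nil => exact absurd hs (segSplit_ne_nil l)
  | cons a s => simp [List.modifyHead]

theorem dropLast_map_ofList (l : List (List Char)) :
    (l.map String.ofList).dropLast = l.dropLast.map String.ofList := by
  induction l with
  | nil => rfl
  | cons a t ih =>
    cases t with
    | nil => rfl
    | cons b u => simpa using ih

-- the two option lists coincide: A's flushed segments = B's segments
theorem segments_agree (command : String) :
    ((command.toList.foldl aStep ([], "")).1)
      = PySem.List.slice
          ((PySem.Str.split? (PySem.Str.replace command "[" "") "]").getD []) none (some (-1)) := by
  have hA := foldl_aStep command.toList [] []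
  have h0 : ("" : String) = String.ofList [] := rfl
  rw [h0, hA]
  simp only [List.nil_append]
  -- B side
  rw [PySem.Str.split?.eq_1, PySem.Chars.split?.eq_1]
  rw [if_neg (by simp [PySem.Str.toList_replace])]
  simp only [Option.map_some, Option.getD_some]
  rw [PySem.Str.toList_replace]
  have : ("[" : String).toList = ['['] := rfl
  rw [this]
  have : ("" : String).toList = [] := rfl
  rw [this]
  rw [chars_replace_eq]
  have : ("]" : String).toList = [']'] := rfl
  rw [this]
  rw [chars_splitOn_eq]
  rw [PySem.List.slice_to_neg_one]
  rw [segsOut_eq]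
  rw [dropLast_map_ofList]
  congr 1
  cases hs : segSplit (command.toList.filter (· ≠ '[')) with
  | nil => exact absurd hs (segSplit_ne_nil _)
  | cons a s => simp [List.modifyHead]

-- ===== VERDICT (by name: the statement is the Claim_ definition above) =====
theorem CommandDecomposition3_spec : Claim_equal_CommandDecomposition3 := by
  intro command _ _
  show ((PySem.List.pyGet? (command.toList.foldl aStep ([], "")).1 0).getD "",
        (PySem.List.pyGet? (command.toList.foldl aStep ([], "")).1 1).getD "",
        (PySem.List.pyGet? (command.toList.foldl aStep ([], "")).1 2).getD "")
      = CommandDecomposition3_alt command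
  rw [segments_agree command]
  rfl
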